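-- pv_equiv track=rewrite | github.com/goracle/dirichlet-divisor-conjecture | gauss_circle_conjecture/identities_verification/identity.py | r2_direct
-- ===== SOURCE A (Python) =====
-- import math
--
-- def r2_direct(n):
--     cnt = 0
--     R = int(math.isqrt(n))
--     for a in range(-R, R+1):
--         b2 = n - a*a
--         if b2 < 0:
--             continue
--         b = int(math.isqrt(b2))
--         if b*b == b2:
--             if b == 0:
--                 cnt += 1
--             else:
--                 cnt += 2
--     return cnt
-- ===== SOURCE B (Python) =====
-- import math
--
-- def r2_direct(n):
--     # Half-range descending scan with symmetry weights: a walks down from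
--     # isqrt(n) to zero; each representation n = a^2 + b^2 with nonnegative
--     # a and b is counted once per sign choice via a multiplicative weight
--     # (doubled for a nonzero coordinate), so negative a is never scanned.
--     total = 0
--     a = math.isqrt(n)
--     while a >= 0:
--         b2 = n - a * a
--         b = math.isqrt(b2)
--         if b * b == b2:
--             total += (1 if a == 0 else 2) * (1 if b == 0 else 2)
--         a -= 1
--     return total
-- ===== Notes on version B (the rewrite author's own statement) =====
-- stated objective: alternative
-- what changed: B replaces A's full for-loop over the symmetric range -R..R with per-point incremental counting by a descending while-loop over only the nonnegative half range that weights each representation with a multiplicative sign-symmetry factor (doubled per nonzero coordinate), with no dead negative-remainder branch.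
import Mathlib
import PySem

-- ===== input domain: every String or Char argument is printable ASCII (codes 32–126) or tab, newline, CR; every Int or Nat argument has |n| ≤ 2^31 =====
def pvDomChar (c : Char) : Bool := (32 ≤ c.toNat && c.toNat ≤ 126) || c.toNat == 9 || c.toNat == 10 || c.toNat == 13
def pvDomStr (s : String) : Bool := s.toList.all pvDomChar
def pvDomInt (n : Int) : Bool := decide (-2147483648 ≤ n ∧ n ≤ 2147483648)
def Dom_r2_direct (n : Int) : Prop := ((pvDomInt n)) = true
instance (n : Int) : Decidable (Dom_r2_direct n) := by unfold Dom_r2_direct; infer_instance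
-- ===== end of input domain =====

-- B replaces A's full for-loop over the symmetric range by a descending while-loop over the
-- nonnegative half range with multiplicative sign-symmetry weights;
-- return-value equivalence only (no side effects in either program).

-- ===== PORT A =====
-- math.isqrt(m) for m ≥ 0 (Python raises ValueError for m < 0; excluded by Pre_)
def pyIsqrt (m : Int) : Int := Int.ofNat m.toNat.sqrt

def r2_direct (n : Int) : Int :=
  let R := pyIsqrt n
  (PySem.List.pyRange (-R) (R + 1) 1).foldl (fun cnt a =>
    let b2 := n - a * a
    if b2 < 0 then cnt
    else
      let b := pyIsqrt b2
      if b * b = b2 then (if b = 0 then cnt + 1 else cnt + 2) else cnt) 0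

-- ===== PORT B =====
-- the while-loop 'while a >= 0: …; a -= 1' of Source B, as structural recursion on a
def altLoop (n : Int) : Nat → Int → Int
  | a, total =>
    let ai : Int := (a : Int)
    let b2 := n - ai * ai
    let b := pyIsqrt b2
    let total' :=
      if b * b = b2 then total + (if ai = 0 then 1 else 2) * (if b = 0 then 1 else 2)
      else total
    match a with
    | 0 => total'
    | a' + 1 => altLoop n a' total'

def r2_direct_alt (n : Int) : Int := altLoop n (pyIsqrt n).toNat 0

-- ===== PRECONDITION & SPEC =====
-- A raises ValueError (math.isqrt of a negative) on negative n; Pre_ excludes exactly those inputs.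
def Pre_r2_direct (n : Int) : Prop := 0 ≤ n
instance (n : Int) : Decidable (Pre_r2_direct n) := by unfold Pre_r2_direct; infer_instance
def pvWitness_r2_direct : Int := (25)
def Spec_r2_direct (n : Int) (out : Int) : Prop := out = r2_direct_alt n
instance (n : Int) (out : Int) : Decidable (Spec_r2_direct n out) := by unfold Spec_r2_direct; infer_instance

-- ===== CLAIM (what is proved, stated in full; the proofs are below) =====
def Claim_equal_r2_direct : Prop := ∀ (n : Int), Dom_r2_direct n → Pre_r2_direct n → Spec_r2_direct n (r2_direct n)

-- ===== LEMMAS AND PROOFS =====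

-- the contribution of one value of a in A's loop
def pvF (n a : Int) : Int :=
  let b2 := n - a * a
  let b := pyIsqrt b2
  if b * b = b2 then (if b = 0 then 1 else 2) else 0

lemma pvF_neg (n a : Int) : pvF n (-a) = pvF n a := by
  simp [pvF]

lemma stepA_eq (n : Int) :
    (fun (cnt a : Int) =>
      let b2 := n - a * a
      if b2 < 0 then cnt
      else
        let b := pyIsqrt b2
        if b * b = b2 then (if b = 0 then cnt + 1 else cnt + 2) else cnt)
    = fun cnt a => cnt + pvF n a := by
  funext c a
  simp only [pvF]
  have hb : 0 ≤ pyIsqrt (n - a * a) := Int.natCast_nonneg _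
  have hbb : 0 ≤ pyIsqrt (n - a * a) * pyIsqrt (n - a * a) := mul_nonneg hb hb
  split_ifs with h1 h2 h3 <;> omega

-- B's loop-body contribution at a equals the sign weight times A's contribution
lemma term_eq (n a : Int) :
    (if pyIsqrt (n - a * a) * pyIsqrt (n - a * a) = n - a * a then
        (if a = 0 then (1 : Int) else 2) * (if pyIsqrt (n - a * a) = 0 then 1 else 2)
      else 0)
    = (if a = 0 then 1 else 2) * pvF n a := by
  simp only [pvF]
  split_ifs <;> ring

-- symmetry: an even summand over -R..R equals the weighted half-range sum over 0..R
lemma sum_sym (f : Int → Int) (hev : ∀ a, f (-a) = f a) :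
    ∀ R : Nat,
      ((PySem.List.pyRange (-(R : Int)) ((R : Int) + 1) 1).map f).sum
        = ((PySem.List.pyRange 0 ((R : Int) + 1) 1).map
            (fun a => (if a = 0 then 1 else 2) * f a)).sum := by
  intro R
  induction R with
  | zero =>
      have h0 : PySem.List.pyRange (0 : Int) 1 1 = [0] := by
        simpa using PySem.List.pyRange_one_singleton (a := (0 : Int))
      simp [h0]
  | succ R ih =>
      have h1 : (-(((R : Int)) + 1)) < (R : Int) + 1 + 1 := by omega
      have hcons := PySem.List.pyRange_one_cons (a := -((R : Int) + 1)) (b := (R : Int) + 1 + 1) h1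
      have h2 : (-(R : Int)) ≤ (R : Int) + 1 := by omega
      have happ := PySem.List.pyRange_one_succ_right (a := -(R : Int)) (b := (R : Int) + 1) h2
      have h3 : (0 : Int) ≤ (R : Int) + 1 := by omega
      have happ' := PySem.List.pyRange_one_succ_right (a := (0 : Int)) (b := (R : Int) + 1) h3
      have hcast : ((R + 1 : Nat) : Int) = (R : Int) + 1 := by push_cast; ring
      rw [hcast]
      have hneg : (-((R : Int) + 1)) + 1 = -(R : Int) := by ring
      rw [hcons, hneg, happ, happ']
      simp only [List.map_cons, List.map_append, List.sum_cons, List.sum_append,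
        List.map_cons, List.map_nil, List.sum_cons, List.sum_nil]
      have hz : ((R : Int) + 1) ≠ 0 := by omega
      rw [ih]
      have := hev ((R : Int) + 1)
      simp [hz] at *
      omega

-- B's descending loop computes the weighted half-range sum over 0..a
lemma altLoop_eq (n : Int) :
    ∀ (a : Nat) (t : Int),
      altLoop n a t
        = t + ((PySem.List.pyRange 0 ((a : Int) + 1) 1).map
            (fun x => (if x = 0 then 1 else 2) * pvF n x)).sum := by
  intro a
  induction a with
  | zero =>
      intro t
      have h0 : PySem.List.pyRange (0 : Int) 1 1 = [0] := by
        simpa using PySem.List.pyRange_one_singleton (a := (0 : Int))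
      simp only [Nat.cast_zero, zero_add]
      rw [h0]
      simp [altLoop, pvF]
      split_ifs <;> ring
  | succ a ih =>
      intro t
      have h3 : (0 : Int) ≤ (a : Int) + 1 := by omega
      have happ := PySem.List.pyRange_one_succ_right (a := (0 : Int)) (b := (a : Int) + 1) h3
      have hcast : ((a + 1 : Nat) : Int) = (a : Int) + 1 := by push_cast; ring
      rw [hcast, happ]
      have hterm := term_eq n ((a : Int) + 1)
      simp only [altLoop, hcast, ih, List.map_append, List.sum_append,
        List.map_cons, List.map_nil, List.sum_cons, List.sum_nil]
      split_ifs at * <;> omega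

lemma r2_direct_eq (n : Int) : r2_direct n = r2_direct_alt n := by
  unfold r2_direct r2_direct_alt
  rw [stepA_eq, PySem.List.foldl_add, altLoop_eq]
  have hR : ((pyIsqrt n).toNat : Int) = pyIsqrt n := by simp [pyIsqrt]
  rw [hR]
  simpa [pyIsqrt] using sum_sym (pvF n) (pvF_neg n) n.toNat.sqrt

-- ===== VERDICT (by name: the statement is the Claim_ definition above) =====
theorem r2_direct_spec : Claim_equal_r2_direct := by
  intro n _ _
  exact r2_direct_eq n
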